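-- pv_equiv track=rewrite | github.com/hicksas-pip/hicksas-repository | hw08/a8.py | kns
-- ===== SOURCE A (Python) =====
-- def kns(lst, k=0):
--     """
--     make a list of all non empty sets of numbers from lst
--     for each set, get the total and keep that with the set in a pair
--     sort all the pairs based on how close the total is to k
--     return the sorted list
--     """
--     result = []
--     n = len(lst)
--     for i in range(1, 2 ** n):
--         subset = []
--         for j in range(n):
--             if (i >> j) & 1:
--                 subset.append(lst[j])
--         result.append((sum(subset), subset))
--     result.sort(key=lambda pair: abs(pair[0] - k))
--     return result
-- ===== SOURCE B (Python) =====
-- def kns(lst, k=0):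
--     # powerset by doubling, carrying incremental sums; same order as bitmask enumeration
--     pairs = [(0, [])]
--     for x in lst:
--         pairs = pairs + [(s + x, sub + [x]) for (s, sub) in pairs]
--     return sorted(pairs[1:], key=lambda p: abs(p[0] - k))
-- ===== Notes on version B (the rewrite author's own statement) =====
-- stated objective: simpler
-- what changed: Replaced the bitmask enumeration (outer loop over 2^n masks with an inner bit-testing loop rebuilding each subset and re-summing it) by iterative powerset doubling that extends all previous subsets with each element while carrying incremental sums, then sorts the non-empty ones; the doubling order equals the bitmask order, so the stable sort agrees.
import Mathlib
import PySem

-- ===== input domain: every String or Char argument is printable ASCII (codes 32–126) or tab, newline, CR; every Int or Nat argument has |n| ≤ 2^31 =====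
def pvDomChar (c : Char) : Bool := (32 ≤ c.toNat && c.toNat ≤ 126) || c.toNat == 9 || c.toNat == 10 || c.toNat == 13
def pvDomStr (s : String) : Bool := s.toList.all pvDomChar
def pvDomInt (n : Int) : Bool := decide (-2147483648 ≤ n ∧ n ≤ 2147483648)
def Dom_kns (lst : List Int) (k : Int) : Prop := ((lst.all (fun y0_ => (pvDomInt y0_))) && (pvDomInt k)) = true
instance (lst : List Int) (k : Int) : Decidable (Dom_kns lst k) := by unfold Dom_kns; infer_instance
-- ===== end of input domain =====

-- B replaces the O(n·2^n·n) bitmask enumeration by iterative powerset doubling with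
-- incremental sums (objective: simpler/alternative; same subset order, so the stable sort agrees).

-- ===== PORT A =====
def kns (lst : List Int) (k : Int) : List (Int × List Int) :=
  let n := lst.length
  let result := (PySem.List.pyRange 1 ((2 : Int) ^ n) 1).foldl
    (fun result i =>
      let subset := (PySem.List.pyRange 0 (n : Int) 1).foldl
        (fun subset j =>
          if PySem.Int.band (i >>> j.toNat) 1 ≠ 0 then
            subset ++ [PySem.List.pyGetD lst j 0]  -- lst[j], j always in range
          else subset) []
      result ++ [(subset.sum, subset)]) []
  PySem.List.sorted result (fun pair => |pair.1 - k|) false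

-- ===== PORT B =====
def kns_alt (lst : List Int) (k : Int) : List (Int × List Int) :=
  let pairs := lst.foldl
    (fun pairs x => pairs ++ pairs.map (fun p => (p.1 + x, p.2 ++ [x])))
    [((0 : Int), ([] : List Int))]
  PySem.List.sorted (pairs.drop 1) (fun p => |p.1 - k|) false  -- pairs[1:]

-- ===== PRECONDITION & SPEC =====
def Spec_kns (lst : List Int) (k : Int) (out : List (Int × List Int)) : Prop := out = kns_alt lst k
instance (lst : List Int) (k : Int) (out : List (Int × List Int)) : Decidable (Spec_kns lst k out) := by unfold Spec_kns; infer_instance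

-- ===== CLAIM (what is proved, stated in full; the proofs are below) =====
def Claim_equal_kns : Prop := ∀ (lst : List Int) (k : Int), Dom_kns lst k → Spec_kns lst k (kns lst k)

-- ===== LEMMAS AND PROOFS =====

-- the subset selected by bitmask i, and its (sum, subset) row
def maskSub (lst : List Int) (i : Nat) : List Int :=
  ((List.range lst.length).filter (fun j => i.testBit j)).map (fun j => lst.getD j 0)

def maskRow (lst : List Int) (i : Nat) : Int × List Int :=
  ((maskSub lst i).sum, maskSub lst i)

theorem maskSub_append_lt (xs : List Int) (x : Int) (i : Nat) (h : i < 2 ^ xs.length) :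
    maskSub (xs ++ [x]) i = maskSub xs i := by
  unfold maskSub
  have hb : i.testBit xs.length = false := Nat.testBit_lt_two_pow h
  simp only [List.length_append, List.length_singleton, List.range_succ, List.filter_append,
    List.filter_singleton, hb, cond_false, List.append_nil]
  refine List.map_congr_left ?_
  intro j hj
  have : j < xs.length := List.mem_range.mp (List.mem_of_mem_filter hj)
  rw [List.getD_append _ _ _ _ this]

theorem maskSub_append_ge (xs : List Int) (x : Int) (i : Nat) (h : i < 2 ^ xs.length) :
    maskSub (xs ++ [x]) (2 ^ xs.length + i) = maskSub xs i ++ [x] := by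
  unfold maskSub
  have hbit : (2 ^ xs.length + i).testBit xs.length = true := by
    simp [Nat.testBit_two_pow_add_eq, Nat.testBit_lt_two_pow h]
  simp only [List.length_append, List.length_singleton, List.range_succ, List.filter_append,
    List.filter_singleton, hbit, cond_true, List.map_append, List.map_cons, List.map_nil]
  congr 1
  · rw [List.filter_congr (fun j hj => by
      have : j < xs.length := List.mem_range.mp hj
      rw [Nat.testBit_two_pow_add_gt this])]
    refine List.map_congr_left ?_
    intro j hj
    have : j < xs.length := List.mem_range.mp (List.mem_of_mem_filter hj)
    rw [List.getD_append _ _ _ _ this]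
  · simp

theorem dbl_eq (lst : List Int) :
    lst.foldl (fun pairs x => pairs ++ pairs.map (fun p => (p.1 + x, p.2 ++ [x])))
      [((0 : Int), ([] : List Int))]
    = (List.range (2 ^ lst.length)).map (maskRow lst) := by
  induction lst using List.reverseRecOn with
  | nil => simp [maskRow, maskSub]
  | append_singleton xs x ih =>
    rw [List.foldl_append, List.foldl_cons, List.foldl_nil, ih]
    have hlen : (xs ++ [x]).length = xs.length + 1 := by simp
    rw [hlen, pow_succ, mul_two, List.range_add, List.map_append]
    congr 1
    · refine (List.map_congr_left ?_).symm
      intro i hi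
      have h := List.mem_range.mp hi
      simp [maskRow, maskSub_append_lt xs x i h]
    · rw [List.map_map, List.map_map]
      refine List.map_congr_left ?_
      intro i hi
      have h := List.mem_range.mp hi
      simp [maskRow, Function.comp, maskSub_append_ge xs x i h]

-- the bit test of port A, on a cast index, is Nat.testBit (stated with port A's elaborated shift instance)
theorem bitCond (iN jn : Nat) :
    ((PySem.Int.band (@HShiftRight.hShiftRight Int Nat Int Int.instHShiftRightNat (iN : Int) jn) 1) ≠ 0)
      = (iN.testBit jn = true) := by
  rw [eq_iff_iff, show (@HShiftRight.hShiftRight Int Nat Int Int.instHShiftRightNat (iN : Int) jn)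
        = ((iN >>> jn : Nat) : Int) from rfl,
    PySem.Int.band_one, PySem.Int.mod_eq_emod_of_pos (by norm_num),
    Nat.testBit, Nat.one_and_eq_mod_two]
  generalize iN >>> jn = m
  simp only [bne_iff_ne, ne_eq]
  omega

-- port A's inner loop builds exactly the bitmask subset
theorem inner_eq (lst : List Int) (i : Int) (iN : Nat) (h : i = (iN : Int)) :
    (PySem.List.pyRange 0 (lst.length : Int) 1).foldl
      (fun subset j =>
        if (PySem.Int.band (@HShiftRight.hShiftRight Int Nat Int Int.instHShiftRightNat i j.toNat) 1) ≠ 0 then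
          subset ++ [PySem.List.pyGetD lst j 0]
        else subset) []
    = maskSub lst iN := by
  subst h
  rw [PySem.List.pyRange_zero_nat, List.foldl_map]
  simp only [bitCond]
  simp only [Int.toNat_natCast, PySem.List.pyGetD_natCast]
  rw [PySem.List.foldl_append_if (fun j => iN.testBit j) (fun j => lst.getD j 0)]
  simp [maskSub]

theorem kns_spec : Claim_equal_kns := by
  intro lst k _
  unfold Spec_kns kns kns_alt
  dsimp only
  rw [dbl_eq, PySem.List.foldl_append_singleton_eq_map, List.nil_append]
  congr 1
  have hM : 0 < 2 ^ lst.length := Nat.two_pow_pos _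
  have h2 : ((2 : Int) ^ lst.length) = ((2 ^ lst.length : Nat) : Int) := by push_cast; ring
  rw [h2, PySem.List.pyRange_one 1, ← List.map_drop,
    show (((2 ^ lst.length : Nat) : Int) - 1).toNat = 2 ^ lst.length - 1 by omega,
    show 2 ^ lst.length = (2 ^ lst.length - 1) + 1 by omega,
    List.range_succ_eq_map, List.drop_succ_cons, List.drop_zero, List.map_map, List.map_map]
  refine List.map_congr_left ?_
  intro kk _
  have hcast : ((1 : Int) + (kk : Int)) = (((kk + 1 : Nat)) : Int) := by push_cast; ring
  rw [Function.comp_apply, Function.comp_apply, inner_eq lst _ (kk + 1) hcast]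
  rfl
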